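-- pv_equiv track=rewrite | github.com/ruihan01/python_answer | 2_string.py | replace_duplicate_chars
-- ===== SOURCE A (Python) =====
-- def replace_duplicate_chars(input_str, k):
--     result = list(input_str)
--     last_seen = {}
--
--     for i, char in enumerate(input_str):
--         if char in last_seen and i - last_seen[char] <= k:
--             result[i] = '-'
--         last_seen[char] = i
--
--     return ''.join(result)
-- ===== SOURCE B (Python) =====
-- def replace_duplicate_chars(input_str, k):
--     return ''.join(
--         '-' if char in input_str[max(0, i - k):i] else char
--         for i, char in enumerate(input_str)
--     )
-- ===== Notes on version B (the rewrite author's own statement) =====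
-- stated objective: simpler
-- what changed: Drops the last_seen dict and the mutable result list: a single comprehension marks position i with '-' exactly when the character occurs in the sliding window input_str[max(0,i-k):i], joined directly.
import Mathlib
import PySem

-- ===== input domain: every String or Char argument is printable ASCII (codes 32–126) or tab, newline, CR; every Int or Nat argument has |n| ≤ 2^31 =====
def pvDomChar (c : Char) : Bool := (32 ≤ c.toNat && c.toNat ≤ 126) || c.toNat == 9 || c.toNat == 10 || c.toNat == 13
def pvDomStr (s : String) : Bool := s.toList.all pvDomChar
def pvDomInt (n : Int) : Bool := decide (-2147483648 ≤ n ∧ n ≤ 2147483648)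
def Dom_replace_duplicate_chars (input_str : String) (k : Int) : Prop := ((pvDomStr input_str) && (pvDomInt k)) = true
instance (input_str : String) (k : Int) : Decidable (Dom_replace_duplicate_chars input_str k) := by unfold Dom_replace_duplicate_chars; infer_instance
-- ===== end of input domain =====

-- B replaces A's last_seen dict + mutable result list by one pass that tests each char against
-- its preceding k-window by a direct slice-membership test (simpler; not faster).

-- ===== PORT A =====
-- loop body of A: "if char in last_seen and i - last_seen[char] <= k: result[i] = '-'" then "last_seen[char] = i".
-- result[i] = '-' is ported as List.set i.toNat (i is the current enumerate index, always a valid nonnegative index).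
def pvStepA (k : Int) (st : List Char × PySem.Dict Char Int) (p : Int × Char) :
    List Char × PySem.Dict Char Int :=
  let result :=
    match st.2.get? p.2 with
    | some j => if p.1 - j ≤ k then st.1.set p.1.toNat '-' else st.1
    | none => st.1
  (result, st.2.insert p.2 p.1)

def replace_duplicate_chars (input_str : String) (k : Int) : String :=
  let cs := input_str.toList                                  -- result = list(input_str)
  let st := (PySem.List.enumerate cs 0).foldl (pvStepA k) (cs, PySem.Dict.empty)
  String.ofList st.1                                          -- ''.join(result) on a list of single chars

-- ===== PORT B =====
-- "'-' if char in input_str[max(0, i - k):i] else char" for each (i, char) of enumerate(input_str)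
def pvMarkB (cs : List Char) (k : Int) (p : Int × Char) : Char :=
  if (PySem.List.slice cs (some (max 0 (p.1 - k))) (some p.1)).contains p.2 then '-' else p.2

def replace_duplicate_chars_alt (input_str : String) (k : Int) : String :=
  let cs := input_str.toList
  String.ofList ((PySem.List.enumerate cs 0).map (pvMarkB cs k))  -- ''.join(generator)

-- ===== PRECONDITION & SPEC =====
def Spec_replace_duplicate_chars (input_str : String) (k : Int) (out : String) : Prop := out = replace_duplicate_chars_alt input_str k
instance (input_str : String) (k : Int) (out : String) : Decidable (Spec_replace_duplicate_chars input_str k out) := by unfold Spec_replace_duplicate_chars; infer_instance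

-- ===== CLAIM (what is proved, stated in full; the proofs are below) =====
def Claim_equal_replace_duplicate_chars : Prop := ∀ (input_str : String) (k : Int), Dom_replace_duplicate_chars input_str k → Spec_replace_duplicate_chars input_str k (replace_duplicate_chars input_str k)

-- ===== LEMMAS AND PROOFS =====

-- index of the last occurrence of c in l (what A's last_seen stores), as the fold Python performs
def pvLastOcc (l : List Char) (c : Char) : Option Int :=
  (PySem.List.enumerate l 0).foldl (fun acc p => if p.2 = c then some p.1 else acc) none

theorem pvLastOcc_append_singleton (l : List Char) (x c : Char) :
    pvLastOcc (l ++ [x]) c = if x = c then some (l.length : Int) else pvLastOcc l c := by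
  simp [pvLastOcc, PySem.List.enumerate_append, PySem.List.enumerate_cons,
    PySem.List.enumerate_nil, List.foldl_append]

theorem pvLastOcc_bounds (l : List Char) (c : Char) (j : Int)
    (h : pvLastOcc l c = some j) : 0 ≤ j ∧ j < l.length := by
  induction l using List.reverseRecOn with
  | nil => simp [pvLastOcc, PySem.List.enumerate_nil] at h
  | append_singleton l x ih =>
    rw [pvLastOcc_append_singleton] at h
    by_cases hx : x = c
    · rw [if_pos hx] at h
      have hje : (l.length : Int) = j := Option.some.inj h
      simp only [List.length_append, List.length_cons, List.length_nil]
      omega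
    · rw [if_neg hx] at h
      have := ih h
      simp only [List.length_append, List.length_cons, List.length_nil]
      omega

theorem pvLastOcc_cond_iff (l : List Char) (c : Char) (m : Nat) :
    (∃ j : Int, pvLastOcc l c = some j ∧ (m : Int) ≤ j) ↔ c ∈ l.drop m := by
  induction l using List.reverseRecOn with
  | nil => simp [pvLastOcc, PySem.List.enumerate_nil]
  | append_singleton l x ih =>
    rw [List.drop_append]
    by_cases hx : x = c
    · subst hx
      by_cases hm : m ≤ l.length
      · constructor
        · intro _; simp [Nat.sub_eq_zero_of_le hm]
        · intro _
          exact ⟨(l.length : Int), by rw [pvLastOcc_append_singleton, if_pos rfl], by exact_mod_cast hm⟩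
      · have hd : l.drop m = [] := List.drop_eq_nil_of_le (by omega)
        have hd2 : ([x].drop (m - l.length) : List Char) = [] :=
          List.drop_eq_nil_of_le (by simp only [List.length_cons, List.length_nil]; omega)
        rw [hd, hd2]
        simp only [List.append_nil, List.not_mem_nil, iff_false]
        rintro ⟨j, hj, hjm⟩
        rw [pvLastOcc_append_singleton, if_pos rfl] at hj
        have hje : (l.length : Int) = j := Option.some.inj hj
        omega
    · rw [pvLastOcc_append_singleton, if_neg hx]
      have hxm : c ∉ ([x].drop (m - l.length) : List Char) := by
        intro hc
        exact hx ((List.mem_singleton.mp (List.mem_of_mem_drop hc)).symm)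
      rw [List.mem_append]
      constructor
      · intro h; exact Or.inl (ih.mp h)
      · rintro (h | h)
        · exact ih.mpr h
        · exact absurd h hxm

-- the preceding-k-window slice of cs at position pre.length is a suffix of pre
theorem pvSlice_eq_drop (pre rest : List Char) (k : Int) :
    PySem.List.slice (pre ++ rest) (some (max 0 ((pre.length : Int) - k))) (some (pre.length : Int))
      = pre.drop (max 0 ((pre.length : Int) - k)).toNat := by
  set a : Int := max 0 ((pre.length : Int) - k) with ha
  have h0a : 0 ≤ a := le_max_left _ _
  have h0n : (0 : Int) ≤ (pre.length : Int) := by positivity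
  rw [PySem.List.slice_toNat _ h0a h0n, Int.toNat_natCast]
  by_cases ham : a.toNat ≤ pre.length
  · rw [List.drop_append, Nat.sub_eq_zero_of_le ham, List.drop_zero]
    exact List.take_left' (by rw [List.length_drop])
  · rw [show pre.length - a.toNat = 0 from by omega, List.take_zero,
      List.drop_eq_nil_of_le (by omega : pre.length ≤ a.toNat)]

-- main loop invariant: with last_seen describing pre's last occurrences and result's tail untouched,
-- folding A's step over the remaining suffix fills the tail with B's per-position markers
theorem pvKey (cs : List Char) (k : Int) :
    ∀ (suf pre res : List Char) (d : PySem.Dict Char Int),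
      pre ++ suf = cs →
      res.length = cs.length →
      res.drop pre.length = suf →
      (∀ c, d.get? c = pvLastOcc pre c) →
      ((PySem.List.enumerate suf (pre.length : Int)).foldl (pvStepA k) (res, d)).1
        = res.take pre.length ++ (PySem.List.enumerate suf (pre.length : Int)).map (pvMarkB cs k) := by
  intro suf
  induction suf with
  | nil =>
    intro pre res d hcat hlen hdrop _
    have hple : cs.length ≤ pre.length := by
      rw [← hcat]; simp
    rw [PySem.List.enumerate_nil]
    simp [List.take_of_length_le (by omega : res.length ≤ pre.length)]
  | cons c suf ih =>
    intro pre res d hcat hlen hdrop hd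
    rw [PySem.List.enumerate_cons, List.foldl_cons, List.map_cons]
    have hlt : pre.length < res.length := by
      by_contra hcon
      rw [List.drop_eq_nil_of_le (Nat.le_of_not_lt hcon)] at hdrop
      exact List.cons_ne_nil _ _ hdrop.symm
    have htake : (res.take pre.length).length = pre.length := by
      rw [List.length_take]; omega
    have hres : res = res.take pre.length ++ c :: suf := by
      conv_lhs => rw [← List.take_append_drop pre.length res, hdrop]
    -- applying the induction hypothesis to a state whose head part is decided
    have hmain : ∀ v : Char,
        ((PySem.List.enumerate suf ((pre.length : Int) + 1)).foldl (pvStepA k)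
            (res.take pre.length ++ v :: suf, d.insert c (pre.length : Int))).1
          = res.take pre.length ++ v ::
              (PySem.List.enumerate suf ((pre.length : Int) + 1)).map (pvMarkB cs k) := by
      intro v
      have hcat' : (pre ++ [c]) ++ suf = cs := by
        rw [List.append_assoc, List.singleton_append, hcat]
      have hlen' : (res.take pre.length ++ v :: suf).length = cs.length := by
        rw [← hcat]
        simp [htake]
      have hdrop' : (res.take pre.length ++ v :: suf).drop (pre ++ [c]).length = suf := by
        simp only [List.length_append, List.length_cons, List.length_nil]
        rw [List.drop_append, List.drop_eq_nil_of_le (by rw [htake]; omega), htake]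
        simp
      have hd' : ∀ c', (d.insert c (pre.length : Int)).get? c' = pvLastOcc (pre ++ [c]) c' := by
        intro c'
        rw [PySem.Dict.get?_insert, pvLastOcc_append_singleton, hd c']
        by_cases hcc : c' = c
        · rw [if_pos hcc, if_pos hcc.symm]
        · rw [if_neg hcc, if_neg (fun h => hcc h.symm)]
      have := ih (pre ++ [c]) (res.take pre.length ++ v :: suf) (d.insert c (pre.length : Int))
        hcat' hlen' hdrop' hd'
      have hcast : (((pre ++ [c]).length : Nat) : Int) = (pre.length : Int) + 1 := by
        simp
      rw [hcast] at this
      have ht2 : (res.take pre.length ++ v :: suf).take (pre ++ [c]).length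
          = res.take pre.length ++ [v] := by
        simp only [List.length_append, List.length_cons, List.length_nil]
        rw [List.take_append, List.take_of_length_le (by rw [htake]; omega), htake]
        simp
      rw [this, ht2, List.append_assoc, List.singleton_append]
  -- the condition A tests is exactly membership in B's window
    set m : Nat := (max 0 ((pre.length : Int) - k)).toNat with hm
    have hmark : pvMarkB cs k ((pre.length : Int), c) = if c ∈ pre.drop m then '-' else c := by
      unfold pvMarkB
      rw [← hcat, pvSlice_eq_drop pre (c :: suf) k]
      by_cases hmem : c ∈ pre.drop m
      · rw [if_pos (List.contains_iff_mem.mpr hmem), if_pos hmem]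
      · rw [if_neg (fun hcon => hmem (List.contains_iff_mem.mp hcon)), if_neg hmem]
    have hcond := pvLastOcc_cond_iff pre c m
    show ((PySem.List.enumerate suf ((pre.length : Int) + 1)).foldl (pvStepA k)
        (pvStepA k (res, d) ((pre.length : Int), c))).1 = _
    rcases hLO : pvLastOcc pre c with _ | j
    · -- char not seen before: result entry stays c, and c is not in the window
      have hnomem : c ∉ pre.drop m := by
        rw [← hcond]
        rintro ⟨j, hj, -⟩
        rw [hLO] at hj
        simp at hj
      have hstep : pvStepA k (res, d) ((pre.length : Int), c)
          = (res.take pre.length ++ c :: suf, d.insert c (pre.length : Int)) := by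
        simp only [pvStepA, hd c, hLO]
        rw [← hres]
      rw [hstep, hmain c, hmark, if_neg hnomem]
    · have hjb := pvLastOcc_bounds pre c j hLO
      by_cases hk : (pre.length : Int) - j ≤ k
      · -- duplicate within the window: A sets '-', and c is in B's window
        have hmem : c ∈ pre.drop m := hcond.mp ⟨j, hLO, by omega⟩
        have hstep : pvStepA k (res, d) ((pre.length : Int), c)
            = (res.take pre.length ++ '-' :: suf, d.insert c (pre.length : Int)) := by
          simp only [pvStepA, hd c, hLO, if_pos hk, Int.toNat_natCast]
          conv_lhs => rw [hres]
          rw [List.set_append, if_neg (by omega : ¬ pre.length < (res.take pre.length).length),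
            htake, Nat.sub_self, List.set_cons_zero]
        rw [hstep, hmain '-', hmark, if_pos hmem]
      · -- last occurrence too far back: result entry stays c, and c is not in the window
        have hnomem : c ∉ pre.drop m := by
          rw [← hcond]
          rintro ⟨j', hj', hmj'⟩
          rw [hLO] at hj'
          have : j = j' := Option.some.inj hj'
          omega
        have hstep : pvStepA k (res, d) ((pre.length : Int), c)
            = (res.take pre.length ++ c :: suf, d.insert c (pre.length : Int)) := by
          simp only [pvStepA, hd c, hLO, if_neg hk]
          rw [← hres]
        rw [hstep, hmain c, hmark, if_neg hnomem]

-- ===== VERDICT (by name: the statement is the Claim_ definition above) =====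
theorem replace_duplicate_chars_spec : Claim_equal_replace_duplicate_chars := by
  intro input_str k _
  unfold Spec_replace_duplicate_chars replace_duplicate_chars replace_duplicate_chars_alt
  have h := pvKey input_str.toList k input_str.toList [] input_str.toList PySem.Dict.empty
    (by simp) rfl (by simp)
    (by intro c; simp [pvLastOcc, PySem.List.enumerate_nil, PySem.Dict.get?_empty])
  simp only [List.length_nil, Nat.cast_zero, List.take_zero, List.nil_append] at h
  simp [h]
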